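-- pv_equiv track=rewrite | github.com/xvrrr/AI-Creator | environment/roles/mad_svc/mad_svc_analyzer.py | parse_lyrics_structure
-- ===== SOURCE A (Python) =====
-- def parse_lyrics_structure(lyrics):
--     """解析歌词结构，返回包含AP和歌词的list，以及LYRICS部分的原歌词"""
--
--     parts = lyrics.split('AP')
--     structure = []
--     lyrics_parts = []
--     for i, part in enumerate(parts):
--         if part:
--             structure.append("LYRICS")  # 用 "LYRICS" 占位
--             lyrics_parts.append(part)  # 存储原歌词
--         if i < len(parts) - 1:  # 如果不是最后一个部分
--             structure.append("AP")  # 添加 "AP"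
--     return structure, lyrics_parts
-- ===== SOURCE B (Python) =====
-- def parse_lyrics_structure(lyrics):
--     """Single left-to-right scan: emit 'AP' tokens and buffered lyric segments directly,
--     without building the intermediate split list."""
--     structure = []
--     lyrics_parts = []
--     buf = []
--     i = 0
--     n = len(lyrics)
--     while i < n:
--         if lyrics.startswith('AP', i):
--             if buf:
--                 structure.append("LYRICS")
--                 lyrics_parts.append(''.join(buf))
--                 buf = []
--             structure.append("AP")
--             i += 2
--         else:
--             buf.append(lyrics[i])
--             i += 1
--     if buf:
--         structure.append("LYRICS")
--         lyrics_parts.append(''.join(buf))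
--     return structure, lyrics_parts
-- ===== Notes on version B (the rewrite author's own statement) =====
-- stated objective: alternative
-- what changed: Replaced split('AP') plus positional enumerate-interleaving with a single left-to-right scanner that matches 'AP' in place and flushes a character buffer, never building the split list.
import Mathlib
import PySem

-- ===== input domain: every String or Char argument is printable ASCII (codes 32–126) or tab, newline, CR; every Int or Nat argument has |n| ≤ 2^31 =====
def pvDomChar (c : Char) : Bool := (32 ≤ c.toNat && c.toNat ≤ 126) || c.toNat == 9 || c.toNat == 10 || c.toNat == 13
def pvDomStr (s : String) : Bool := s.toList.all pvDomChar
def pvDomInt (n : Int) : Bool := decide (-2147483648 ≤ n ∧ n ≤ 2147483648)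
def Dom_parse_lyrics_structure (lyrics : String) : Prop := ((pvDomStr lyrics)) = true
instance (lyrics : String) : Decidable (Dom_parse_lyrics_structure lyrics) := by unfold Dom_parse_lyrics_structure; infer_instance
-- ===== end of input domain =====

-- B replaces split('AP') + positional enumerate-interleaving by a single in-place scanner with a char buffer (objective: alternative, same cost).

-- ===== PORT A =====
def parse_lyrics_structure (lyrics : String) : List String × List String :=
  let parts := PySem.Chars.splitOn lyrics.toList ("AP".toList)
  (PySem.List.enumerate parts 0).foldl
    (fun (st : List String × List String) (ip : Int × List Char) =>
      let st1 := if ip.2 ≠ [] then (st.1 ++ ["LYRICS"], st.2 ++ [String.ofList ip.2]) else st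
      if ip.1 < (parts.length : Int) - 1 then (st1.1 ++ ["AP"], st1.2) else st1)
    ([], [])

-- ===== PORT B =====
-- B's while loop over positions, matching 'AP' in place, as structural recursion over the chars.
def pvScanB : List Char → List Char → List String → List String → List String × List String
  | 'A' :: 'P' :: rest, buf, st, ps =>
      let flushed := if buf ≠ [] then (st ++ ["LYRICS"], ps ++ [String.ofList buf]) else (st, ps)
      pvScanB rest [] (flushed.1 ++ ["AP"]) flushed.2
  | c :: rest, buf, st, ps => pvScanB rest (buf ++ [c]) st ps
  | [], buf, st, ps => if buf ≠ [] then (st ++ ["LYRICS"], ps ++ [String.ofList buf]) else (st, ps)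

def parse_lyrics_structure_alt (lyrics : String) : List String × List String :=
  pvScanB lyrics.toList [] [] []

-- ===== PRECONDITION & SPEC =====
def Spec_parse_lyrics_structure (lyrics : String) (out : List String × List String) : Prop := out = parse_lyrics_structure_alt lyrics
instance (lyrics : String) (out : List String × List String) : Decidable (Spec_parse_lyrics_structure lyrics out) := by unfold Spec_parse_lyrics_structure; infer_instance

-- ===== CLAIM (what is proved, stated in full; the proofs are below) =====
def Claim_equal_parse_lyrics_structure : Prop := ∀ (lyrics : String), Dom_parse_lyrics_structure lyrics → Spec_parse_lyrics_structure lyrics (parse_lyrics_structure lyrics)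

-- ===== LEMMAS AND PROOFS =====

-- A clean recursive characterisation of splitOn _ ['A','P'].
def pvMsplit : List Char → List (List Char)
  | 'A' :: 'P' :: rest => [] :: pvMsplit rest
  | c :: rest =>
      match pvMsplit rest with
      | p :: ps => (c :: p) :: ps
      | [] => [[c]]
  | [] => [[]]

theorem pvMsplit_ne_nil (l : List Char) : pvMsplit l ≠ [] := by
  induction l using pvMsplit.induct with
  | _ => simp_all [pvMsplit]

def pvMapHead (f : List Char → List Char) : List (List Char) → List (List Char)
  | [] => []
  | p :: ps => f p :: ps

theorem pvSplitOn_go_spec : ∀ (fuel : Nat) (l : List Char), l.length + 1 ≤ fuel →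
    ∀ (cur : List Char) (acc : List (List Char)),
    PySem.Chars.splitOn.go ['A','P'] fuel l cur acc
      = acc.reverse ++ pvMapHead (cur.reverse ++ ·) (pvMsplit l) := by
  intro fuel
  induction fuel with
  | zero => intro l h; omega
  | succ fuel ih =>
    intro l hl cur acc
    match l with
    | [] =>
      simp [PySem.Chars.splitOn.go, pvMsplit, pvMapHead]
    | [c] =>
      have h1 : (1 : Nat) ≤ fuel := by simpa using Nat.le_of_succ_le_succ hl
      rw [show PySem.Chars.splitOn.go ['A','P'] (fuel+1) [c] cur acc
            = PySem.Chars.splitOn.go ['A','P'] fuel [] (c :: cur) acc by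
          simp [PySem.Chars.splitOn.go, List.isPrefixOf]]
      rw [ih [] (by simpa using h1) (c :: cur) acc]
      simp [pvMsplit, pvMapHead]
    | c1 :: c2 :: rest =>
      by_cases hc : c1 = 'A' ∧ c2 = 'P'
      · obtain ⟨h1, h2⟩ := hc; subst h1; subst h2
        rw [show PySem.Chars.splitOn.go ['A','P'] (fuel+1) ('A'::'P'::rest) cur acc
              = PySem.Chars.splitOn.go ['A','P'] fuel rest [] (cur.reverse :: acc) by
            simp [PySem.Chars.splitOn.go, List.isPrefixOf]]
        rw [ih rest (by simp at hl ⊢; omega) [] (cur.reverse :: acc)]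
        rcases h : pvMsplit rest with _ | ⟨p, ps⟩
        · exact absurd h (pvMsplit_ne_nil rest)
        · simp [pvMsplit, pvMapHead, h]
      · have hpre : List.isPrefixOf ['A','P'] (c1 :: c2 :: rest) = false := by
          simp [List.isPrefixOf]
          intro h1 h2; exact hc ⟨h1.symm, h2.symm⟩
        rw [show PySem.Chars.splitOn.go ['A','P'] (fuel+1) (c1::c2::rest) cur acc
              = PySem.Chars.splitOn.go ['A','P'] fuel (c2::rest) (c1 :: cur) acc by
            simp [PySem.Chars.splitOn.go, hpre]]
        rw [ih (c2::rest) (by simp at hl ⊢; omega) (c1 :: cur) acc]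
        rcases h : pvMsplit (c2 :: rest) with _ | ⟨p, ps⟩
        · exact absurd h (pvMsplit_ne_nil _)
        · rw [show pvMsplit (c1 :: c2 :: rest) = (c1 :: p) :: ps by
              rw [pvMsplit.eq_2 c1 (c2 :: rest)
                    (by intro r h1 h2; injection h2 with e1 e2; exact hc ⟨h1, e1⟩)]
              rw [h]]
          simp [pvMapHead]

theorem pvSplitOn_eq_msplit (l : List Char) :
    PySem.Chars.splitOn l ("AP".toList) = pvMsplit l := by
  have : "AP".toList = ['A', 'P'] := by decide
  rw [this]
  show PySem.Chars.splitOn.go ['A','P'] (l.length + 1) l [] [] = pvMsplit l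
  rw [pvSplitOn_go_spec (l.length + 1) l (le_refl _) [] []]
  rcases h : pvMsplit l with _ | ⟨p, ps⟩
  · exact absurd h (pvMsplit_ne_nil _)
  · simp [pvMapHead]

-- The recursive interleaving that the A-side fold computes over the split parts.
def pvInter : List (List Char) → List String × List String
  | [] => ([], [])
  | [p] => if p ≠ [] then (["LYRICS"], [String.ofList p]) else ([], [])
  | p :: q :: ps =>
      let rest := pvInter (q :: ps)
      ((if p ≠ [] then ["LYRICS", "AP"] else ["AP"]) ++ rest.1,
       (if p ≠ [] then [String.ofList p] else []) ++ rest.2)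

theorem pvFoldA_spec (n : Nat) : ∀ (ps : List (List Char)) (k : Int) (acc : List String × List String),
    k + ps.length = n →
    (PySem.List.enumerate ps k).foldl
      (fun (st : List String × List String) (ip : Int × List Char) =>
        let st1 := if ip.2 ≠ [] then (st.1 ++ ["LYRICS"], st.2 ++ [String.ofList ip.2]) else st
        if ip.1 < (n : Int) - 1 then (st1.1 ++ ["AP"], st1.2) else st1)
      acc
    = (acc.1 ++ (pvInter ps).1, acc.2 ++ (pvInter ps).2) := by
  intro ps
  induction ps with
  | nil => intro k acc h; simp [PySem.List.enumerate, pvInter]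
  | cons p tl ih =>
    intro k acc h
    rw [PySem.List.enumerate_cons, List.foldl_cons]
    rcases tl with _ | ⟨q, qs⟩
    · have hk : ¬ (k < (n : Int) - 1) := by simp at h; omega
      simp only [PySem.List.enumerate_nil, List.foldl_nil]
      by_cases hp : p = []
      · simp [hp, hk, pvInter]
      · simp [hp, hk, pvInter]
    · have hk : k < (n : Int) - 1 := by simp at h; omega
      rw [ih (k + 1) _ (by simp at h ⊢; omega)]
      by_cases hp : p = []
      · simp [hp, hk, pvInter]
      · simp [hp, hk, pvInter]

theorem pvScanB_spec : ∀ (l buf : List Char) (st ps : List String),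
    pvScanB l buf st ps
      = (st ++ (pvInter (pvMapHead (buf ++ ·) (pvMsplit l))).1,
         ps ++ (pvInter (pvMapHead (buf ++ ·) (pvMsplit l))).2) := by
  intro l
  induction l using pvMsplit.induct with
  | case1 rest ih =>
    intro buf st ps
    rw [show pvScanB ('A'::'P'::rest) buf st ps
          = pvScanB rest []
              ((if buf ≠ [] then (st ++ ["LYRICS"], ps ++ [String.ofList buf]) else (st, ps)).1 ++ ["AP"])
              (if buf ≠ [] then (st ++ ["LYRICS"], ps ++ [String.ofList buf]) else (st, ps)).2
        from rfl]
    rw [ih]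
    rcases h : pvMsplit rest with _ | ⟨q, qs⟩
    · exact absurd h (pvMsplit_ne_nil _)
    · by_cases hb : buf = []
      · simp [hb, pvMsplit, pvMapHead, h, pvInter]
      · simp [hb, pvMsplit, pvMapHead, h, pvInter]
  | case2 c rest hshape p ps' hms ih =>
    intro buf st ps
    rw [pvScanB.eq_2 buf st ps c rest hshape]
    rw [ih]
    rw [pvMsplit.eq_2 c rest hshape, hms]
    simp [pvMapHead]
  | case3 c rest hshape hms ih =>
    exact absurd hms (pvMsplit_ne_nil _)
  | case4 =>
    intro buf st ps
    by_cases hb : buf = []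
    · simp [pvScanB, hb, pvMsplit, pvMapHead, pvInter]
    · simp [pvScanB, hb, pvMsplit, pvMapHead, pvInter]

-- ===== VERDICT (by name: the statement is the Claim_ definition above) =====
theorem parse_lyrics_structure_spec : Claim_equal_parse_lyrics_structure := by
  intro lyrics _
  show parse_lyrics_structure lyrics = parse_lyrics_structure_alt lyrics
  unfold parse_lyrics_structure parse_lyrics_structure_alt
  rw [pvScanB_spec]
  simp only [pvSplitOn_eq_msplit]
  rw [pvFoldA_spec (pvMsplit lyrics.toList).length (pvMsplit lyrics.toList) 0 ([], []) (by simp)]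
  rcases h : pvMsplit lyrics.toList with _ | ⟨p, ps⟩
  · exact absurd h (pvMsplit_ne_nil _)
  · simp [pvMapHead]
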